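-- pv_equiv track=rewrite | github.com/Kimayano/MixedPartition | init.py | getconsnum
-- ===== SOURCE A (Python) =====
-- def getconsnum(str):
-- #get coeff of constant
--   num=""
--   le=len(str)
--   for i in list(range(0,le)):
--     if(str[i]=='+' or str[i]=='-'):
--       no=i
--       num+=str[i]
--       for j in list(range(no+1,le)):
--         if(str[j].isdigit()):
--           num+=(str[j])
--         elif (str[j]=='>'):
--           break
--         else:
--           num=""
--           break
--   if num == "":
--     num="0"
--   return int(num)
-- ===== SOURCE B (Python) =====
-- def getconsnum(str):
--     # Single forward-pointer tokenizer: consume each sign+digit run as one slice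
--     # and jump past it, instead of A's nested index loops.
--     num = ""
--     i = 0
--     n = len(str)
--     while i < n:
--         if str[i] in "+-":
--             j = i + 1
--             while j < n and str[j].isdigit():
--                 j += 1
--             if j == n or str[j] == '>':
--                 num += str[i:j]
--             else:
--                 num = ""
--             i = j
--         else:
--             i += 1
--     if num == "":
--         num = "0"
--     return int(num)
-- ===== Notes on version B (the rewrite author's own statement) =====
-- stated objective: simpler
-- what changed: A's nested index loops (outer scan over every position with an inner indexed digit loop per sign) are replaced by a single forward-pointer tokenizer that consumes each sign+digit run as one slice and jumps past it.
import Mathlib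
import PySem

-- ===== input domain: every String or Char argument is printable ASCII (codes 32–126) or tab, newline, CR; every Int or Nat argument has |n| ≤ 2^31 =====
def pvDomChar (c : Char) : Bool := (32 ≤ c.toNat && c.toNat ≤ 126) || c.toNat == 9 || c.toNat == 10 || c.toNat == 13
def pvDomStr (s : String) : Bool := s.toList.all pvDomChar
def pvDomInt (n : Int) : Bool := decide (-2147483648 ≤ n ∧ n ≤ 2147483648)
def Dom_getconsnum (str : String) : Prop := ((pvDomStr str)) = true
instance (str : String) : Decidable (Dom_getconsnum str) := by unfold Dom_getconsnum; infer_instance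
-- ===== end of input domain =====

-- B replaces A's nested index loops (which revisit digit positions in the outer loop)
-- by a single forward-pointer tokenizer that consumes each sign+digit run as one slice
-- and jumps past it; objective: simpler/idiomatic, same O(n) cost.

-- ===== PORT A =====
-- inner 'for j in range(no+1, le)' loop with its two breaks, accumulating num as List Char
def pvAInner (l : List Char) (j : Nat) (num : List Char) : List Char :=
  if h : j < l.length then
    let c := l[j]
    if PySem.Chars.isdigit c then pvAInner l (j+1) (num ++ [c])
    else if c = '>' then num
    else []
  else num
termination_by l.length - j

-- outer 'for i in range(0, le)' loop
def pvAOuter (l : List Char) (i : Nat) (num : List Char) : List Char :=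
  if h : i < l.length then
    let c := l[i]
    let num' := if c = '+' ∨ c = '-' then pvAInner l (i+1) (num ++ [c]) else num
    pvAOuter l (i+1) num'
  else num
termination_by l.length - i

def getconsnum (str : String) : Int :=
  let num := pvAOuter str.toList 0 []
  let num := if num = [] then ['0'] else num
  -- int(num): Pre_ guarantees success; outside Pre_ Python raises ValueError
  (PySem.Int.ofChars? num).getD 0

-- ===== PORT B =====
-- single pass over the remaining characters; a sign consumes its greedy digit run in one step
def pvBScan (l : List Char) (num : List Char) : List Char :=
  match l with
  | [] => num
  | c :: rest =>
    if c = '+' ∨ c = '-' then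
      let digs := rest.takeWhile PySem.Chars.isdigit
      let rest' := rest.dropWhile PySem.Chars.isdigit
      let num' := if rest' = [] ∨ rest'.head? = some '>' then num ++ c :: digs else []
      pvBScan rest' num'
    else pvBScan rest num
termination_by l.length
decreasing_by
  · have := List.length_dropWhile_le (p := PySem.Chars.isdigit) (l := rest)
    simp; omega
  · simp

def getconsnum_alt (str : String) : Int :=
  let num := pvBScan str.toList []
  let num := if num = [] then ['0'] else num
  (PySem.Int.ofChars? num).getD 0

-- ===== PRECONDITION & SPEC =====
-- Helpers describing the sign+digit runs of the INPUT (no port is run):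
-- a sign at index i is "kept" if its greedy digit run ends at '>' or at end of string,
-- otherwise it is a "reset" (A clears the accumulator there).
def pvRunTail (l : List Char) (i : Nat) : List Char := (l.drop (i+1)).dropWhile PySem.Chars.isdigit
def pvIsSign (l : List Char) (i : Nat) : Bool := l.getD i ' ' == '+' || l.getD i ' ' == '-'
def pvKept (l : List Char) (i : Nat) : Bool :=
  pvIsSign l i && ((pvRunTail l i).isEmpty || (pvRunTail l i).head? == some '>')
def pvReset (l : List Char) (i : Nat) : Bool :=
  pvIsSign l i && !((pvRunTail l i).isEmpty || (pvRunTail l i).head? == some '>')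
-- kept signs with no reset after them: exactly the runs int() is finally applied to
def pvLive (l : List Char) : List Nat :=
  (List.range l.length).filter
    (fun i => pvKept l i && (List.range l.length).all (fun i' => decide (i' ≤ i) || !pvReset l i'))
-- Pre_ excludes exactly the inputs where A's final int(num) raises ValueError: more than one
-- surviving kept run, or a surviving kept sign with no digit after it (num like "+1+2" or "-").
def Pre_getconsnum (str : String) : Prop :=
  (pvLive str.toList).length ≤ 1 ∧
  ∀ i ∈ pvLive str.toList, (str.toList.drop (i+1)).takeWhile PySem.Chars.isdigit ≠ []
instance (str : String) : Decidable (Pre_getconsnum str) := by unfold Pre_getconsnum; infer_instance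
def pvWitness_getconsnum : String := "x+12>"

def Spec_getconsnum (str : String) (out : Int) : Prop := out = getconsnum_alt str
instance (str : String) (out : Int) : Decidable (Spec_getconsnum str out) := by unfold Spec_getconsnum; infer_instance

-- ===== CLAIM (what is proved, stated in full; the proofs are below) =====
def Claim_equal_getconsnum : Prop := ∀ (str : String), Dom_getconsnum str → Pre_getconsnum str → Spec_getconsnum str (getconsnum str)

-- ===== LEMMAS AND PROOFS =====

-- A's inner loop computes: keep the greedy digit run if it ends at '>' or the end, else reset.
theorem pvAInner_eq (l : List Char) (j : Nat) (num : List Char) :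
    pvAInner l j num =
      (if (l.drop j).dropWhile PySem.Chars.isdigit = [] ∨
          ((l.drop j).dropWhile PySem.Chars.isdigit).head? = some '>'
       then num ++ (l.drop j).takeWhile PySem.Chars.isdigit else []) := by
  generalize hk : l.length - j = k
  induction k generalizing j num with
  | zero =>
    rw [pvAInner]
    have h : ¬ j < l.length := by omega
    rw [dif_neg h]
    rw [List.drop_eq_nil_of_le (by omega)]
    simp
  | succ k ih =>
    rw [pvAInner]
    have h : j < l.length := by omega
    simp only [h, dif_pos]
    have hdrop : l.drop j = l[j] :: l.drop (j+1) := List.drop_eq_getElem_cons h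
    rw [hdrop]
    by_cases hd : PySem.Chars.isdigit l[j]
    · simp only [hd, if_pos, List.dropWhile_cons_of_pos, List.takeWhile_cons_of_pos]
      rw [ih (j+1) (num ++ [l[j]]) (by omega)]
      split <;> simp
    · simp only [hd, if_neg, List.dropWhile_cons_of_neg, List.takeWhile_cons_of_neg,
        Bool.not_eq_true]
      by_cases hgt : l[j] = '>'
      · simp [hgt]
      · have hc : ¬(l[j] :: List.drop (j+1) l = [] ∨
            (l[j] :: List.drop (j+1) l).head? = some '>') := by
          simp only [List.head?_cons, not_or]
          refine ⟨by exact fun hx => (List.cons_ne_nil _ _) hx, by simp [hgt]⟩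
        rw [if_neg hgt, if_neg hc]

-- B's scan ignores digit characters standing free (they are not signs).
theorem pv_digit_not_sign (c : Char) (h : PySem.Chars.isdigit c = true) :
    ¬(c = '+' ∨ c = '-') := by
  rintro (rfl | rfl) <;> simp [PySem.Chars.isdigit] at h

theorem pvBScan_digits (ds r num : List Char) (h : ∀ c ∈ ds, PySem.Chars.isdigit c = true) :
    pvBScan (ds ++ r) num = pvBScan r num := by
  induction ds with
  | nil => rfl
  | cons d ds ih =>
    rw [List.cons_append, pvBScan]
    rw [if_neg (pv_digit_not_sign d (h d List.mem_cons_self))]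
    exact ih (fun c hc => h c (List.mem_cons_of_mem _ hc))

theorem pvMain (l : List Char) (i : Nat) (num : List Char) :
    pvAOuter l i num = pvBScan (l.drop i) num := by
  generalize hk : l.length - i = k
  induction k generalizing i num with
  | zero =>
    have h : ¬ i < l.length := by omega
    rw [pvAOuter, dif_neg h, List.drop_eq_nil_of_le (by omega), pvBScan]
  | succ k ih =>
    have h : i < l.length := by omega
    rw [pvAOuter, dif_pos h]
    show pvAOuter l (i+1)
        (if l[i] = '+' ∨ l[i] = '-' then pvAInner l (i+1) (num ++ [l[i]]) else num) =
      pvBScan (l.drop i) num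
    have hdrop : l.drop i = l[i] :: l.drop (i+1) := List.drop_eq_getElem_cons h
    rw [hdrop, pvBScan]
    by_cases hs : l[i] = '+' ∨ l[i] = '-'
    · rw [if_pos hs, if_pos hs]
      show pvAOuter l (i+1) (pvAInner l (i+1) (num ++ [l[i]])) =
        pvBScan ((l.drop (i+1)).dropWhile PySem.Chars.isdigit)
          (if (l.drop (i+1)).dropWhile PySem.Chars.isdigit = [] ∨
              ((l.drop (i+1)).dropWhile PySem.Chars.isdigit).head? = some '>'
           then num ++ l[i] :: (l.drop (i+1)).takeWhile PySem.Chars.isdigit else [])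
      rw [ih (i+1) _ (by omega)]
      have hsplit : l.drop (i+1) =
          (l.drop (i+1)).takeWhile PySem.Chars.isdigit ++
          (l.drop (i+1)).dropWhile PySem.Chars.isdigit :=
        (List.takeWhile_append_dropWhile).symm
      have hbs : ∀ x : List Char, pvBScan (l.drop (i+1)) x =
          pvBScan ((l.drop (i+1)).dropWhile PySem.Chars.isdigit) x := by
        intro x
        conv_lhs => rw [hsplit]
        exact pvBScan_digits _ _ _ (fun c hc => List.mem_takeWhile_imp hc)
      rw [hbs, pvAInner_eq]
      congr 1
      by_cases hc : List.dropWhile PySem.Chars.isdigit (List.drop (i+1) l) = [] ∨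
          (List.dropWhile PySem.Chars.isdigit (List.drop (i+1) l)).head? = some '>'
      · rw [if_pos hc, if_pos hc]
        simp
      · rw [if_neg hc, if_neg hc]
    · rw [if_neg hs, if_neg hs]
      exact ih (i+1) num (by omega)

-- ===== VERDICT (by name: the statement is the Claim_ definition above) =====
theorem getconsnum_spec : Claim_equal_getconsnum := by
  intro s _ _
  unfold Spec_getconsnum getconsnum getconsnum_alt
  rw [show pvAOuter s.toList 0 [] = pvBScan s.toList [] from by
    simpa using pvMain s.toList 0 []]
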